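-- pv_equiv track=rewrite | github.com/LouisSchiltz/exam-18-11 | dodona/zigzag.py | iszigzag
-- ===== SOURCE A (Python) =====
-- def iszigzag(reeks):
--     n = len(reeks)
--
--     for i in range(0, n, 2):  # alleen even indexen controleren
--         if i - 1 >= 0 and reeks[i] < reeks[i - 1]:
--             return False
--         if i + 1 < n and reeks[i] < reeks[i + 1]:
--             return False
--     return True
-- ===== SOURCE B (Python) =====
-- def iszigzag(reeks):
--     ev = reeks[0::2]
--     od = reeks[1::2]
--     return all(not (a < b) for a, b in zip(ev, od)) and \
--            all(not (a < b) for a, b in zip(ev[1:], od))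
-- ===== Notes on version B (the rewrite author's own statement) =====
-- stated objective: alternative
-- what changed: Replaces the even-index loop with two early returns per iteration by two staged passes: split the list into stride-2 slices reeks[0::2] and reeks[1::2], then check each even-indexed slice element against the odd slice on both sides via zip.
import Mathlib
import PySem

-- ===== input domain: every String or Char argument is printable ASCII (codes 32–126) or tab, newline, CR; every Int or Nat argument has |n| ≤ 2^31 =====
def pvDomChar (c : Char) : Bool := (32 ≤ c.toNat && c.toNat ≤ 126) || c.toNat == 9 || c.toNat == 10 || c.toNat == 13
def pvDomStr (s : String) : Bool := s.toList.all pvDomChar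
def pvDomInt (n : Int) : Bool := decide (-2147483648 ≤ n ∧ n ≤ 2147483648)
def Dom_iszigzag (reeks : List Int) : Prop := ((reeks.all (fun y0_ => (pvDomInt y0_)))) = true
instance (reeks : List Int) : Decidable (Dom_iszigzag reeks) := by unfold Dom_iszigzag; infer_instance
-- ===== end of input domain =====

-- B replaces A's even-index loop (two neighbour checks per even index) by two staged passes over
-- the stride-2 slices reeks[0::2] and reeks[1::2], comparing them pairwise via zip; same O(n) cost.
-- ===== PORT A =====

def iszigzagA_go (reeks : List Int) (n : Int) : List Int → Bool
  | [] => true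
  | i :: rest =>
    if i - 1 ≥ 0 ∧ PySem.List.pyGetD reeks i 0 < PySem.List.pyGetD reeks (i - 1) 0 then false
    else if i + 1 < n ∧ PySem.List.pyGetD reeks i 0 < PySem.List.pyGetD reeks (i + 1) 0 then false
    else iszigzagA_go reeks n rest

def iszigzag (reeks : List Int) : Bool :=
  let n : Int := reeks.length
  iszigzagA_go reeks n (PySem.List.pyRange 0 n 2)

-- ===== PORT B =====
def iszigzag_alt (reeks : List Int) : Bool :=
  let ev := (PySem.List.slice? reeks none none 2).getD []      -- reeks[0::2] (step-2 slice never fails)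
  let od := (PySem.List.slice? reeks (some 1) none 2).getD []  -- reeks[1::2]
  ((ev.zip od).all fun p => !decide (p.1 < p.2)) &&
  (((PySem.List.slice ev (some 1) none).zip od).all fun p => !decide (p.1 < p.2))

-- ===== PRECONDITION & SPEC =====
def Spec_iszigzag (reeks : List Int) (out : Bool) : Prop := out = iszigzag_alt reeks
instance (reeks : List Int) (out : Bool) : Decidable (Spec_iszigzag reeks out) := by unfold Spec_iszigzag; infer_instance

-- ===== CLAIM (what is proved, stated in full; the proofs are below) =====
def Claim_equal_iszigzag : Prop := ∀ (reeks : List Int), Dom_iszigzag reeks → Spec_iszigzag reeks (iszigzag reeks)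

-- ===== LEMMAS AND PROOFS =====

-- A's early-return loop over even indices equals List.all of the two negated checks
lemma go_all (reeks : List Int) (n : Int) (l : List Int) :
    iszigzagA_go reeks n l = l.all (fun i =>
      !decide (i - 1 ≥ 0 ∧ PySem.List.pyGetD reeks i 0 < PySem.List.pyGetD reeks (i - 1) 0) &&
      !decide (i + 1 < n ∧ PySem.List.pyGetD reeks i 0 < PySem.List.pyGetD reeks (i + 1) 0)) := by
  induction l with
  | nil => rfl
  | cons i rest ih =>
    simp only [iszigzagA_go, List.all_cons, ih]
    by_cases h1 : i - 1 ≥ 0 ∧ PySem.List.pyGetD reeks i 0 < PySem.List.pyGetD reeks (i - 1) 0 <;>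
      by_cases h2 : i + 1 < n ∧ PySem.List.pyGetD reeks i 0 < PySem.List.pyGetD reeks (i + 1) 0 <;>
      simp [h1, h2]

lemma a_iff (reeks : List Int) :
    iszigzag reeks = true ↔
      ∀ j : Nat, (h : j + 1 < reeks.length) →
        if j % 2 = 0 then reeks[j+1] ≤ reeks[j] else reeks[j] ≤ reeks[j+1] := by
  unfold iszigzag
  rw [go_all, List.all_eq_true]
  constructor
  · intro H j h
    rcases Nat.even_or_odd j with he | ho
    · have h0 : j % 2 = 0 := Nat.even_iff.mp he
      have hmem : (j : Int) ∈ PySem.List.pyRange 0 reeks.length 2 := by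
        rw [PySem.List.mem_pyRange_iff_of_pos (by omega)]
        exact ⟨by omega, by exact_mod_cast (by omega : (j:Int) < reeks.length), by omega⟩
      have := H _ hmem
      simp only [Bool.and_eq_true, Bool.not_eq_true', decide_eq_false_iff_not, not_and, not_lt] at this
      have h2 := this.2 (by exact_mod_cast (by omega : (j:Int) + 1 < reeks.length))
      rw [@PySem.List.pyGetD_eq_getElem _ reeks ((j:Int)+1) 0 (by omega) (by omega),
          @PySem.List.pyGetD_eq_getElem _ reeks (j:Int) 0 (by omega) (by omega)] at h2
      simp only [h0, if_pos]
      convert h2 using 2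
    · have h1 : j % 2 = 1 := Nat.odd_iff.mp ho
      have hmem : ((j : Int) + 1) ∈ PySem.List.pyRange 0 reeks.length 2 := by
        rw [PySem.List.mem_pyRange_iff_of_pos (by omega)]
        exact ⟨by omega, by exact_mod_cast (by omega : (j:Int) + 1 < reeks.length), by omega⟩
      have := H _ hmem
      simp only [Bool.and_eq_true, Bool.not_eq_true', decide_eq_false_iff_not, not_and, not_lt] at this
      have h2 := this.1 (by omega)
      rw [@PySem.List.pyGetD_eq_getElem _ reeks ((j:Int)+1-1) 0 (by omega) (by omega),
          @PySem.List.pyGetD_eq_getElem _ reeks ((j:Int)+1) 0 (by omega) (by omega)] at h2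
      simp [h1]
      convert h2 using 2
      omega
  · intro H i hmem
    rw [PySem.List.mem_pyRange_iff_of_pos (by omega)] at hmem
    obtain ⟨h0, hn, hdvd⟩ := hmem
    simp only [Bool.and_eq_true, Bool.not_eq_true', decide_eq_false_iff_not, not_and, not_lt]
    constructor
    · intro hge
      have hlen : (i - 1).toNat + 1 < reeks.length := by omega
      have := H (i-1).toNat hlen
      have hodd : (i-1).toNat % 2 = 1 := by omega
      rw [hodd] at this; simp at this
      rw [@PySem.List.pyGetD_eq_getElem _ reeks (i-1) 0 (by omega) (by omega),
          @PySem.List.pyGetD_eq_getElem _ reeks i 0 (by omega) (by omega)]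
      convert this using 2 <;> omega
    · intro hlt
      have hlen : i.toNat + 1 < reeks.length := by omega
      have := H i.toNat hlen
      have hev : i.toNat % 2 = 0 := by omega
      rw [hev] at this; simp at this
      rw [@PySem.List.pyGetD_eq_getElem _ reeks (i+1) 0 (by omega) (by omega),
          @PySem.List.pyGetD_eq_getElem _ reeks i 0 (by omega) (by omega)]
      convert this using 2
      omega

-- the stride-2 subsequence of a list, as a structural recursion (proof helper for B's slices)
def every2 : List Int → List Int
  | [] => []
  | [x] => [x]
  | x :: _ :: xs => x :: every2 xs

lemma length_every2 (xs : List Int) : (every2 xs).length = (xs.length + 1) / 2 := by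
  fun_induction every2 xs with
  | case1 => rfl
  | case2 x => simp
  | case3 x y xs ih => simp [ih]; omega

lemma getElem_every2 (xs : List Int) (k : Nat) (h2 : 2 * k < xs.length)
    (h : k < (every2 xs).length) : (every2 xs)[k] = xs[2 * k] := by
  induction xs using every2.induct generalizing k with
  | case1 => simp at h2
  | case2 x => cases k with
    | zero => rfl
    | succ k => simp at h2
  | case3 x y xs ih =>
    cases k with
    | zero => rfl
    | succ k =>
      have hh : k < (every2 xs).length := by simp [every2] at h; omega
      have := ih k (by simp at h2; omega) hh
      simp only [every2, List.getElem_cons_succ]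
      have e : (x :: y :: xs)[2*(k+1)]'(by simpa using h2) = xs[2*k]'(by simp at h2; omega) := by
        simp only [show 2*(k+1) = 2*k+1+1 by ring, List.getElem_cons_succ]
      rw [e]; exact this

lemma filterMap_every2 (xs : List Int) :
    (List.range ((xs.length + 1) / 2)).filterMap (fun k => xs[2 * k]?) = every2 xs := by
  induction xs using every2.induct with
  | case1 => rfl
  | case2 x => simp [every2, List.range_one]
  | case3 x y xs ih =>
    have hlen : ((x :: y :: xs).length + 1) / 2 = (xs.length + 1) / 2 + 1 := by
      simp; omega
    rw [hlen, List.range_succ_eq_map, List.filterMap_cons, List.filterMap_map]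
    norm_num
    have : (fun k : Nat => (x :: y :: xs)[2 * (k + 1)]?) = fun k => xs[2 * k]? := by
      funext k
      simp [show 2 * (k + 1) = (2 * k + 1) + 1 by ring]
    rw [this, ih, every2]

lemma slice?_even (xs : List Int) :
    PySem.List.slice? xs none none 2 = some (every2 xs) := by
  rw [← filterMap_every2]
  simp only [PySem.List.slice?, PySem.List.sliceIndices]
  norm_num
  have h1 : (if 0 < xs.length then (((xs.length : Int) + 2 - 1) / 2).toNat else 0) = (xs.length + 1) / 2 := by
    split_ifs with h
    · omega
    · omega
  have h2 : (fun k : Nat => xs[(2 * (k:Int)).toNat]?) = fun k : Nat => xs[2 * k]? := by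
    funext k; congr 1
  rw [h1, h2]

lemma slice?_odd (xs : List Int) :
    PySem.List.slice? xs (some 1) none 2 = some (every2 xs.tail) := by
  rw [← filterMap_every2]
  simp only [PySem.List.slice?, PySem.List.sliceIndices]
  norm_num
  cases xs with
  | nil => simp
  | cons x t =>
    simp only [List.length_cons]
    have hmin : min (1:Int) (((t.length + 1) : Nat) : Int) = 1 := by omega
    rw [hmin]
    have h1 : (if 1 < t.length + 1 then ((((t.length + 1 : Nat) : Int) - 1 + 2 - 1) / 2).toNat else 0)
        = (t.length + 1) / 2 := by
      split_ifs with h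
      · omega
      · omega
    have h2 : (fun k : Nat => (x :: t)[((1:Int) + 2 * (k:Int)).toNat]?) = fun k : Nat => t[2 * k]? := by
      funext k
      have h3 : ((1:Int) + 2 * (k:Int)).toNat = 2 * k + 1 := by omega
      rw [h3, List.getElem?_cons_succ]
    rw [h1, h2]
    have h4 : t.length + 1 - 1 + 1 = t.length + 1 := by omega
    simp only [h4, List.getElem?_cons_succ]

lemma alt_iff (reeks : List Int) :
    iszigzag_alt reeks = true ↔
      ∀ j : Nat, (h : j + 1 < reeks.length) →
        if j % 2 = 0 then reeks[j+1] ≤ reeks[j] else reeks[j] ≤ reeks[j+1] := by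
  unfold iszigzag_alt
  rw [slice?_even, slice?_odd]
  simp only [Option.getD_some, PySem.List.slice_from_one, Bool.and_eq_true, List.all_eq_true]
  have hodL : (every2 reeks.tail).length = reeks.length / 2 := by
    rw [length_every2]; simp [List.length_tail]; omega
  have hevL : (every2 reeks).length = (reeks.length + 1) / 2 := length_every2 reeks
  have hod : ∀ k (h2 : 2*k + 1 < reeks.length) h, (every2 reeks.tail)[k]'h = reeks[2*k+1]'h2 := by
    intro k h2 h
    have ht : 2*k < reeks.tail.length := by simp [List.length_tail]; omega
    rw [getElem_every2 reeks.tail k ht h, List.getElem_tail]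
  have hzipL : ((every2 reeks).zip (every2 reeks.tail)).length = reeks.length / 2 := by
    rw [List.length_zip, hevL, hodL]; omega
  have hzipL2 : ((every2 reeks).tail.zip (every2 reeks.tail)).length
      = min ((reeks.length + 1) / 2 - 1) (reeks.length / 2) := by
    rw [List.length_zip, List.length_tail, hevL, hodL]
  constructor
  · rintro ⟨H1, H2⟩ j h
    rcases Nat.even_or_odd j with he | ho
    · obtain ⟨k, hj⟩ := he
      have hj2 : j = 2 * k := by omega
      subst hj2
      have hk : k < ((every2 reeks).zip (every2 reeks.tail)).length := by omega
      have := H1 _ (List.getElem_mem hk)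
      rw [List.getElem_zip] at this
      rw [getElem_every2 reeks k (by omega) (by omega),
          hod k (by omega) (by rw [hodL]; omega)] at this
      simp only [Bool.not_eq_true', decide_eq_false_iff_not, not_lt] at this
      rw [if_pos (by omega)]
      exact this
    · obtain ⟨k, hj⟩ := ho
      subst hj
      have hk : k < ((every2 reeks).tail.zip (every2 reeks.tail)).length := by
        rw [hzipL2]; omega
      have := H2 _ (List.getElem_mem hk)
      rw [List.getElem_zip, List.getElem_tail] at this
      rw [getElem_every2 reeks (k+1) (by omega) (by omega),
          hod k (by omega) (by rw [hodL]; omega)] at this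
      simp only [Bool.not_eq_true', decide_eq_false_iff_not, not_lt] at this
      rw [if_neg (by omega)]
      simpa [show 2*(k+1) = 2*k+1+1 by ring] using this
  · intro H
    constructor
    · intro p hp
      obtain ⟨k, hk, rfl⟩ := List.mem_iff_getElem.mp hp
      have hkl : k < reeks.length / 2 := by omega
      rw [List.getElem_zip]
      rw [getElem_every2 reeks k (by omega) (by omega),
          hod k (by omega) (by rw [hodL]; omega)]
      have := H (2*k) (by omega)
      rw [if_pos (by omega)] at this
      simp only [Bool.not_eq_true', decide_eq_false_iff_not, not_lt]
      exact this
    · intro p hp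
      obtain ⟨k, hk, rfl⟩ := List.mem_iff_getElem.mp hp
      have hkl : 2*k + 2 < reeks.length := by
        rw [hzipL2] at hk; omega
      rw [List.getElem_zip, List.getElem_tail]
      rw [getElem_every2 reeks (k+1) (by omega) (by omega),
          hod k (by omega) (by rw [hodL]; omega)]
      have := H (2*k+1) (by omega)
      rw [if_neg (by omega)] at this
      simp only [Bool.not_eq_true', decide_eq_false_iff_not, not_lt]
      simpa [show 2*(k+1) = 2*k+1+1 by ring] using this

lemma iszigzag_eq_alt (reeks : List Int) : iszigzag reeks = iszigzag_alt reeks := by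
  have := (a_iff reeks).trans (alt_iff reeks).symm
  cases hA : iszigzag reeks <;> cases hB : iszigzag_alt reeks <;> simp_all

-- ===== VERDICT (by name: the statement is the Claim_ definition above) =====
theorem iszigzag_spec : Claim_equal_iszigzag := by
  intro reeks _
  unfold Spec_iszigzag
  exact iszigzag_eq_alt reeks
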